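-- pv_equiv track=rewrite | github.com/mitchellwind/datamagic | datamagic/databoard/views.py | search_suggest
-- ===== SOURCE A (Python) =====
-- def search_suggest(user_input, search_list, split_char=" "):
--
--     match_list = []
--     for search_string in search_list:
--         match_flag = 1
--         for char in user_input.split(split_char):
--             if char not in search_string:
--                 match_flag = 0
--         if match_flag == 1:
--             match_list.append(search_string)
--
--     return match_list
-- ===== SOURCE B (Python) =====
-- def search_suggest(user_input, search_list, split_char=" "):
--     match_list = list(search_list)
--     for char in user_input.split(split_char):
--         match_list = [s for s in match_list if char in s]
--     return match_list
-- ===== Notes on version B (the rewrite author's own statement) =====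
-- stated objective: faster
-- what changed: Token-major filter pipeline: loops over query tokens, shrinking a candidate list with a filter per token, instead of a per-string inner loop with a match flag; the candidate list shrinks after each token and A's inner loop never breaks, so B does far less substring work.
-- outside the precondition, e.g. on search_suggest('', [], ''): A returns [], B raises ValueError
import Mathlib
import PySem

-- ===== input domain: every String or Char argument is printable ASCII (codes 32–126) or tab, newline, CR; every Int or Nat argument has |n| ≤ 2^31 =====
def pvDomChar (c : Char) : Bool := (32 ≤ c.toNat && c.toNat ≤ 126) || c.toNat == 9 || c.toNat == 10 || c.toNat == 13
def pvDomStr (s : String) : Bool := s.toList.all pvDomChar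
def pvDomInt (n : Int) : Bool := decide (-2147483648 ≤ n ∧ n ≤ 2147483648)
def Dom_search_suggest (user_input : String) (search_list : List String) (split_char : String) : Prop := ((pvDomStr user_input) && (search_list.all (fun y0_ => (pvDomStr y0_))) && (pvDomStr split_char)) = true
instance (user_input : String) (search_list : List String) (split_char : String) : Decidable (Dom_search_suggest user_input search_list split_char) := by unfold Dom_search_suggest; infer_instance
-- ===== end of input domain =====

-- ===== PORT A =====
-- B differs only in loop organisation (token-major filter pipeline vs per-string flag); same results. Pre_ excludes split_char = "" (Python str.split raises ValueError there).
def search_suggest (user_input : String) (search_list : List String) (split_char : String) : List String :=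
  match PySem.Str.split? user_input split_char with
  | none => []  -- unreachable under Pre_ (split_char ≠ "")
  | some toks =>
    search_list.foldl (fun match_list search_string =>
      let match_flag : Int :=
        toks.foldl (fun f c => if PySem.Str.isIn c search_string then f else 0) 1
      if match_flag == 1 then match_list ++ [search_string] else match_list) []

-- ===== PORT B =====
def search_suggest_alt (user_input : String) (search_list : List String) (split_char : String) : List String :=
  match PySem.Str.split? user_input split_char with
  | none => []  -- unreachable under Pre_ (split_char ≠ "")
  | some toks =>
    toks.foldl (fun match_list c => match_list.filter (fun s => PySem.Str.isIn c s)) search_list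

-- ===== PRECONDITION & SPEC =====
-- Pre_ excludes split_char = "", on which str.split raises ValueError (A only avoids it when search_list is empty and then returns []; B splits up front and raises there).
def Pre_search_suggest (user_input : String) (search_list : List String) (split_char : String) : Prop := split_char ≠ ""
instance (user_input : String) (search_list : List String) (split_char : String) : Decidable (Pre_search_suggest user_input search_list split_char) := by unfold Pre_search_suggest; infer_instance
def pvWitness_search_suggest : String × List String × String := ("ab c", ["cab", "b", "xy"], " ")
def Spec_search_suggest (user_input : String) (search_list : List String) (split_char : String) (out : List String) : Prop := out = search_suggest_alt user_input search_list split_char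
instance (user_input : String) (search_list : List String) (split_char : String) (out : List String) : Decidable (Spec_search_suggest user_input search_list split_char out) := by unfold Spec_search_suggest; infer_instance

-- ===== CLAIM (what is proved, stated in full; the proofs are below) =====
def Claim_equal_search_suggest : Prop := ∀ (user_input : String) (search_list : List String) (split_char : String), Dom_search_suggest user_input search_list split_char → Pre_search_suggest user_input search_list split_char → Spec_search_suggest user_input search_list split_char (search_suggest user_input search_list split_char)

-- ===== LEMMAS AND PROOFS =====
-- A's inner flag loop computes 1 iff every token is a substring.
theorem flag_loop_eq (toks : List String) (s : String) (f0 : Int) :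
    toks.foldl (fun f c => if PySem.Str.isIn c s then f else 0) f0
      = if toks.all (fun c => PySem.Str.isIn c s) then f0 else 0 := by
  induction toks generalizing f0 with
  | nil => simp
  | cons t ts ih =>
    simp only [List.foldl_cons, List.all_cons, ih]
    by_cases h : PySem.Str.isIn t s = true <;>
      by_cases h2 : (ts.all fun c => PySem.Str.isIn c s) = true <;> simp_all

-- B's token-major filter pipeline equals one filter by the conjunction of all tokens.
theorem filter_pipeline_eq (toks : List String) (sl : List String) :
    toks.foldl (fun ml c => ml.filter (fun s => PySem.Str.isIn c s)) sl
      = sl.filter (fun s => toks.all (fun c => PySem.Str.isIn c s)) := by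
  induction toks generalizing sl with
  | nil => simp
  | cons t ts ih =>
    simp only [List.foldl_cons, ih, List.filter_filter, List.all_cons]
    congr 1
    funext a
    exact Bool.and_comm _ _

-- ===== VERDICT (by name: the statement is the Claim_ definition above) =====
theorem search_suggest_spec : Claim_equal_search_suggest := by
  intro ui sl sc _ _
  unfold Spec_search_suggest search_suggest search_suggest_alt
  cases h : PySem.Str.split? ui sc with
  | none => rfl
  | some toks =>
    simp only [flag_loop_eq, filter_pipeline_eq]
    rw [show (fun (match_list : List String) search_string =>
          if ((if toks.all (fun c => PySem.Str.isIn c search_string) then (1:Int) else 0) == 1)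
          then match_list ++ [search_string] else match_list)
        = fun match_list search_string =>
          if toks.all (fun c => PySem.Str.isIn c search_string)
          then match_list ++ [search_string] else match_list from by
      funext ml s; by_cases h : toks.all (fun c => PySem.Str.isIn c s) = true <;> simp [h]]
    rw [PySem.List.foldl_append_if_eq_filter]
    simp
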